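-- pv_equiv track=rewrite | github.com/AnaClaraZoppiSerpa/Research | code/mds/mds_search/gupta_pandey_check.py | lcirc
-- ===== SOURCE A (Python) =====
-- def lcirc(row):
-- 	first_row = list(row)
-- 	dim = len(first_row)
-- 	rows = []
-- 	prev_row = []
--
-- 	for i in range(dim):
-- 		if i == 0:
-- 			rows.append(first_row)
-- 			prev_row = first_row
-- 		else:
-- 			new_row = prev_row[1:]
-- 			new_last = prev_row[0]
-- 			new_row += [new_last]
-- 			rows.append(new_row)
-- 			prev_row = new_row
-- 	return rows
-- ===== SOURCE B (Python) =====
-- def lcirc(row):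
--     first_row = list(row)
--     return [first_row[i:] + first_row[:i] for i in range(len(first_row))]
-- ===== Notes on version B (the rewrite author's own statement) =====
-- stated objective: simpler
-- what changed: Each row is computed independently as the slice-rotation first_row[i:]+first_row[:i], replacing the sequential prev_row state that rotates the previous row one step at a time.
import Mathlib
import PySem

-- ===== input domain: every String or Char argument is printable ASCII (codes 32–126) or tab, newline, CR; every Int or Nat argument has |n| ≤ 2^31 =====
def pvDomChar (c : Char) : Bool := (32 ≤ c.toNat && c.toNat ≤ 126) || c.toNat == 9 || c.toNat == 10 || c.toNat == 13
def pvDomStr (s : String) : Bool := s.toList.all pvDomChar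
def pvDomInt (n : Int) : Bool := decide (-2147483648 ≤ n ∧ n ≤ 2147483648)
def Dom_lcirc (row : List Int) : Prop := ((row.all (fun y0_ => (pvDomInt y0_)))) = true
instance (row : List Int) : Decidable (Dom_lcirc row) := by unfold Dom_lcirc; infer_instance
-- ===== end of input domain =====

-- B replaces A's sequential prev_row rotation with independent slice-rotations of the original row (simpler decomposition).

-- ===== PORT A =====
-- the loop over range(dim) with state (rows, prev_row); 'prev_row[0]' is only
-- reached with i > 0, where prev_row is nonempty, so headD 0 is exact there
def lcircLoop : List Int → List (List Int) → List Int → List Int → List (List Int)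
  | [], rows, _, _ => rows
  | i :: rest, rows, prev, first =>
    if i = 0 then lcircLoop rest (rows ++ [first]) first first
    else
      let new_row := prev.drop 1 ++ [prev.headD 0]
      lcircLoop rest (rows ++ [new_row]) new_row first

def lcirc (row : List Int) : List (List Int) :=
  lcircLoop (PySem.List.pyRange 0 (row.length : Int) 1) [] [] row

-- ===== PORT B =====
def lcirc_alt (row : List Int) : List (List Int) :=
  (PySem.List.pyRange 0 (row.length : Int) 1).map
    (fun i => PySem.List.slice row (some i) none ++ PySem.List.slice row none (some i))

-- ===== PRECONDITION & SPEC =====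
def Spec_lcirc (row : List Int) (out : List (List Int)) : Prop := out = lcirc_alt row
instance (row : List Int) (out : List (List Int)) : Decidable (Spec_lcirc row out) := by unfold Spec_lcirc; infer_instance

-- ===== CLAIM (what is proved, stated in full; the proofs are below) =====
def Claim_equal_lcirc : Prop := ∀ (row : List Int), Dom_lcirc row → Spec_lcirc row (lcirc row)

-- ===== LEMMAS AND PROOFS =====

-- rotation by j: the value of A's prev_row after j iterations, and of B's row i = j
def rot (j : Nat) (row : List Int) : List Int := row.drop j ++ row.take j

lemma rot_step (row : List Int) (j : Nat) (hj : j < row.length) :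
    (rot j row).drop 1 ++ [(rot j row).headD 0] = rot (j + 1) row := by
  have h1 : List.drop j row = row[j] :: List.drop (j + 1) row := List.drop_eq_getElem_cons hj
  have h2 : List.take (j + 1) row = List.take j row ++ [row[j]] := by
    rw [List.take_add_one]; simp [List.getElem?_eq_getElem hj]
  simp only [rot]
  rw [h1]
  simp only [List.cons_append, List.drop_one, List.tail_cons, List.headD_cons, h2,
    List.append_assoc]

lemma loop_lemma (row : List Int) : ∀ (m j : Nat) (rows : List (List Int)),
    1 ≤ j → m = row.length - j →
    lcircLoop (PySem.List.pyRange (j : Int) (row.length : Int) 1) rows (rot (j - 1) row) row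
      = rows ++ (List.range m).map (fun t => rot (j + t) row) := by
  intro m
  induction m with
  | zero =>
    intro j rows hj hm
    rw [PySem.List.pyRange_one_eq_nil (by omega)]
    simp [lcircLoop]
  | succ m ih =>
    intro j rows hj hm
    have hjlt : j < row.length := by omega
    rw [PySem.List.pyRange_one_cons (by exact_mod_cast hjlt)]
    simp only [lcircLoop]
    rw [if_neg (by exact_mod_cast Nat.one_le_iff_ne_zero.mp hj)]
    have hstep : (rot (j - 1) row).drop 1 ++ [(rot (j - 1) row).headD 0] = rot j row := by
      have := rot_step row (j - 1) (by omega)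
      rwa [Nat.sub_add_cancel hj] at this
    simp only [hstep]
    have hcast : ((j : Int) + 1) = ((j + 1 : Nat) : Int) := by push_cast; ring
    rw [hcast]
    have := ih (j + 1) (rows ++ [rot j row]) (by omega) (by omega)
    rw [Nat.add_sub_cancel] at this
    rw [this, List.range_succ_eq_map]
    simp [List.map_map, Function.comp, rot, Nat.add_comm, Nat.add_left_comm]

theorem lcirc_eq_alt (row : List Int) : lcirc row = lcirc_alt row := by
  unfold lcirc lcirc_alt
  have hB : (PySem.List.pyRange 0 (row.length : Int) 1).map
      (fun i => PySem.List.slice row (some i) none ++ PySem.List.slice row none (some i))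
      = (List.range row.length).map (fun t => rot t row) := by
    rw [PySem.List.pyRange_zero_nat]
    rw [List.map_map]
    apply List.map_congr_left
    intro t _
    simp [Function.comp, PySem.List.slice_from _ (by positivity : (0:Int) ≤ (t:Int)),
      PySem.List.slice_to _ (by positivity : (0:Int) ≤ (t:Int)), rot]
  rw [hB]
  rcases Nat.eq_zero_or_pos row.length with h0 | hpos
  · rw [h0, PySem.List.pyRange_zero_nat]
    simp [lcircLoop]
  · rw [PySem.List.pyRange_one_cons (by exact_mod_cast hpos)]
    simp only [lcircLoop, if_true, List.nil_append]
    have h1 : ((0:Int) + 1) = ((1 : Nat) : Int) := by norm_num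
    have hl := loop_lemma row (row.length - 1) 1 [row] (Nat.le_refl 1) rfl
    rw [show rot (1 - 1) row = row from by simp [rot]] at hl
    rw [h1, hl]
    obtain ⟨m, hm⟩ : ∃ m, row.length = m + 1 := ⟨row.length - 1, by omega⟩
    rw [hm, Nat.add_sub_cancel, List.range_succ_eq_map]
    simp [List.map_map, Function.comp, rot, Nat.add_comm]

-- ===== VERDICT (by name: the statement is the Claim_ definition above) =====
theorem lcirc_spec : Claim_equal_lcirc := by
  intro row _
  exact lcirc_eq_alt row
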